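-- pv_equiv track=rewrite | github.com/mandistep2026/PureOS | shell/shell.py | _expand_set
-- ===== SOURCE A (Python) =====
-- def _expand_set(s: str) -> str:
--     """Expand character ranges like a-z."""
--     import re as _re
--     result = []
--     i = 0
--     while i < len(s):
--         if i + 2 < len(s) and s[i + 1] == '-':
--             start, end = ord(s[i]), ord(s[i + 2])
--             if start <= end:
--                 result.extend(chr(c) for c in range(start, end + 1))
--             else:
--                 result.extend([s[i], '-', s[i + 2]])
--             i += 3
--         elif s[i] == '\\' and i + 1 < len(s):
--             esc = s[i + 1]
--             result.append({'n': '\n', 't': '\t', 'r': '\r', '\\': '\\'}.get(esc, esc))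
--             i += 2
--         else:
--             result.append(s[i])
--             i += 1
--     return ''.join(result)
-- ===== SOURCE B (Python) =====
-- import re
--
-- _TOKEN = re.compile(r'(.)-(.)|\\(.)|(.)', re.DOTALL)
-- _ESCAPES = {'n': '\n', 't': '\t', 'r': '\r', '\\': '\\'}
--
-- def _expand_set(s: str) -> str:
--     pieces = []
--     for m in _TOKEN.finditer(s):
--         lo, hi, esc, ch = m.groups()
--         if lo is not None:
--             if lo <= hi:
--                 pieces.append(''.join(map(chr, range(ord(lo), ord(hi) + 1))))
--             else:
--                 pieces.append(lo + '-' + hi)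
--         elif esc is not None:
--             pieces.append(_ESCAPES.get(esc, esc))
--         else:
--             pieces.append(ch)
--     return ''.join(pieces)
-- ===== Notes on version B (the rewrite author's own statement) =====
-- stated objective: idiomatic
-- what changed: Replaces A's hand-rolled index loop with manual bounds checks by a compiled regex tokenizer ((.)-(.)|\(.)|(.) under DOTALL) iterated with finditer, dispatching on which alternation group matched.
import Mathlib
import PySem

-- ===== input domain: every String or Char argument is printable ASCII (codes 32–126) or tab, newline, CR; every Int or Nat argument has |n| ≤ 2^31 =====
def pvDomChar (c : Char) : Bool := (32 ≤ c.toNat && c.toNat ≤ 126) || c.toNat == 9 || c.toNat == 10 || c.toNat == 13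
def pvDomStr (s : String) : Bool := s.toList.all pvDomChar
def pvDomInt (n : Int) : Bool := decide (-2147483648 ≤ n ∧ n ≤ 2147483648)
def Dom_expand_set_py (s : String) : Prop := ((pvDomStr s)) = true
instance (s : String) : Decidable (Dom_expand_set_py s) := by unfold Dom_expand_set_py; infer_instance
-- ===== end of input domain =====

-- B replaces A's hand-rolled index loop with an idiomatic regex tokenizer (same single pass, same cost).

-- ===== PORT A =====
-- shared literal helpers: chr(c) for c in range(a, b+1)  and  the escape dict {'n':'\n','t':'\t','r':'\r','\\':'\\'}.get(e, e)
def chrRange (a b : Nat) : List Char :=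
  (PySem.List.pyRange (a : Int) ((b : Int) + 1) 1).map (fun c => Char.ofNat c.toNat)
def escChar (e : Char) : Char :=
  if e = 'n' then '\n' else if e = 't' then '\t' else if e = 'r' then '\r'
  else if e = '\\' then '\\' else e

-- A: while loop over index i, appending to an accumulator `result`, joined at the end.
-- indices are read with List.getD; every read is guarded in range by the same tests A makes, so it is exact.
def expandLoopA (cs : List Char) (i : Nat) (result : List Char) : List Char :=
  if i < cs.length then
    if i + 2 < cs.length ∧ cs.getD (i+1) ' ' = '-' then
      let start := (cs.getD i ' ').toNat
      let stop  := (cs.getD (i+2) ' ').toNat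
      let piece := if start ≤ stop then chrRange start stop
                   else [cs.getD i ' ', '-', cs.getD (i+2) ' ']
      expandLoopA cs (i+3) (result ++ piece)
    else if cs.getD i ' ' = '\\' ∧ i + 1 < cs.length then
      expandLoopA cs (i+2) (result ++ [escChar (cs.getD (i+1) ' ')])
    else
      expandLoopA cs (i+1) (result ++ [cs.getD i ' '])
  else result
termination_by cs.length - i

def expand_set_py (s : String) : String := String.ofList (expandLoopA s.toList 0 [])

-- ===== PORT B =====
-- B tokenizes with the regex (.)-(.)|\\(.)|(.) under DOTALL; finditer's left-to-right
-- non-overlapping matching with ordered alternation is ported by hand, exactly, as this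
-- priority-ordered pattern match producing the list of pieces; ''.join = flatten.
def tokPiecesB : List Char → List (List Char)
  | lo :: '-' :: hi :: rest =>
      (if lo.toNat ≤ hi.toNat then chrRange lo.toNat hi.toNat else [lo, '-', hi]) :: tokPiecesB rest
  | '\\' :: e :: rest => [escChar e] :: tokPiecesB rest
  | c :: rest => [c] :: tokPiecesB rest
  | [] => []

def expand_set_py_alt (s : String) : String := String.ofList (tokPiecesB s.toList).flatten

-- ===== PRECONDITION & SPEC =====
def Spec_expand_set_py (s : String) (out : String) : Prop := out = expand_set_py_alt s
instance (s : String) (out : String) : Decidable (Spec_expand_set_py s out) := by unfold Spec_expand_set_py; infer_instance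

-- ===== CLAIM (what is proved, stated in full; the proofs are below) =====
def Claim_equal_expand_set_py : Prop := ∀ (s : String), Dom_expand_set_py s → Spec_expand_set_py s (expand_set_py s)

-- ===== LEMMAS AND PROOFS =====

-- ===== VERDICT (by name: the statement is the Claim_ definition above) =====
-- how the regex tokenizer consumes a prefix, by the shape of the list
lemma tok_range (lo hi : Char) (t : List Char) :
    tokPiecesB (lo :: '-' :: hi :: t) =
      (if lo.toNat ≤ hi.toNat then chrRange lo.toNat hi.toNat else [lo, '-', hi]) :: tokPiecesB t := by
  simp [tokPiecesB]

lemma tok_esc (e : Char) (t : List Char) (hnd : e ≠ '-') :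
    tokPiecesB ('\\' :: e :: t) = [escChar e] :: tokPiecesB t := by
  simp [tokPiecesB, hnd]

lemma tok_esc_two (e : Char) : tokPiecesB ['\\', e] = [[escChar e]] := by
  rcases eq_or_ne e '-' with rfl | _
  · rfl
  · simp [tokPiecesB]

lemma tok_plain (c b : Char) (t : List Char) (hc : c ≠ '\\') (hb : b ≠ '-') :
    tokPiecesB (c :: b :: t) = [c] :: tokPiecesB (b :: t) := by
  simp [tokPiecesB, hc, hb]

lemma tok_plain_two (c b : Char) (hc : c ≠ '\\') :
    tokPiecesB [c, b] = [c] :: tokPiecesB [b] := by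
  simp [tokPiecesB, hc]

lemma tok_single (c : Char) : tokPiecesB [c] = [[c]] := by
  simp [tokPiecesB]

lemma expandLoopA_eq_aux (n : Nat) : ∀ (cs : List Char) (i : Nat) (result : List Char),
    cs.length - i ≤ n → expandLoopA cs i result = result ++ (tokPiecesB (cs.drop i)).flatten := by
  induction n with
  | zero =>
      intro cs i result hle
      rw [expandLoopA, if_neg (by omega), List.drop_eq_nil_of_le (by omega)]
      simp [tokPiecesB]
  | succ n ih =>
      intro cs i result hle
      rw [expandLoopA]
      by_cases h : i < cs.length
      · rw [if_pos h]
        by_cases hr : i + 2 < cs.length ∧ cs.getD (i + 1) ' ' = '-'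
        · -- range branch: drop i = cs[i] :: '-' :: cs[i+2] :: drop (i+3)
          obtain ⟨h2, hdash⟩ := hr
          rw [List.getD_eq_getElem cs ' ' (by omega : i + 1 < cs.length)] at hdash
          have hd3 : cs.drop i = cs[i] :: '-' :: cs[i+2] :: cs.drop (i+3) := by
            rw [List.drop_eq_getElem_cons h,
              List.drop_eq_getElem_cons (show i + 1 < cs.length by omega),
              List.drop_eq_getElem_cons (show i + 1 + 1 < cs.length by omega), hdash]
          rw [if_pos ⟨h2, by rw [List.getD_eq_getElem cs ' ' (by omega)]; exact hdash⟩,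
            ih cs (i+3) _ (by omega), hd3, tok_range]
          simp only [List.getD_eq_getElem cs ' ' h, List.getD_eq_getElem cs ' ' h2,
            List.flatten_cons, List.append_assoc]
        · rw [if_neg hr]
          by_cases he : cs.getD i ' ' = '\\' ∧ i + 1 < cs.length
          · -- escape branch: the range pattern cannot match drop i
            obtain ⟨hbs, h1⟩ := he
            rw [List.getD_eq_getElem cs ' ' h] at hbs
            rw [if_pos ⟨by rw [List.getD_eq_getElem cs ' ' h]; exact hbs, h1⟩,
              ih cs (i+2) _ (by omega)]
            rcases Nat.lt_or_ge (i+2) cs.length with h2 | h2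
            · have hnd : cs[i+1] ≠ '-' := by
                intro hd; exact hr ⟨h2, by rw [List.getD_eq_getElem cs ' ' (by omega)]; exact hd⟩
              have hd2 : cs.drop i = '\\' :: cs[i+1] :: cs.drop (i+2) := by
                rw [List.drop_eq_getElem_cons h,
                  List.drop_eq_getElem_cons (show i + 1 < cs.length by omega), hbs]
              rw [hd2, tok_esc _ _ hnd]
              simp only [List.getD_eq_getElem cs ' ' h1, List.flatten_cons, List.append_assoc]
            · have hd2 : cs.drop i = ['\\', cs[i+1]] := by
                rw [List.drop_eq_getElem_cons h,
                  List.drop_eq_getElem_cons (show i + 1 < cs.length by omega),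
                  List.drop_eq_nil_of_le (show cs.length ≤ i + 1 + 1 by omega), hbs]
              rw [hd2, tok_esc_two, List.drop_eq_nil_of_le (show cs.length ≤ i + 2 by omega)]
              simp only [List.getD_eq_getElem cs ' ' h1, tokPiecesB, List.flatten_cons,
                List.flatten_nil, List.append_nil]
          · -- plain-char branch: neither the range nor the escape pattern matches drop i
            rw [if_neg he, ih cs (i+1) _ (by omega)]
            rcases Nat.lt_or_ge (i+1) cs.length with h1 | h1
            · have hnb : cs[i] ≠ '\\' := by
                intro hb; exact he ⟨by rw [List.getD_eq_getElem cs ' ' h]; exact hb, h1⟩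
              have hd1 : cs.drop i = cs[i] :: cs.drop (i+1) := List.drop_eq_getElem_cons h
              have hd1' : cs.drop (i+1) = cs[i+1] :: cs.drop (i+2) :=
                List.drop_eq_getElem_cons h1
              rcases Nat.lt_or_ge (i+2) cs.length with h2 | h2
              · have hnd : cs[i+1] ≠ '-' := by
                  intro hd; exact hr ⟨h2, by rw [List.getD_eq_getElem cs ' ' (by omega)]; exact hd⟩
                rw [hd1, hd1', tok_plain _ _ _ hnb hnd, ← hd1']
                simp only [List.getD_eq_getElem cs ' ' h, List.flatten_cons,
                  List.append_assoc, List.singleton_append]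
              · have hend : cs.drop (i+2) = [] :=
                  List.drop_eq_nil_of_le (show cs.length ≤ i + 2 by omega)
                rw [hd1, hd1', hend, tok_plain_two _ _ hnb, ← hend, ← hd1']
                simp only [List.getD_eq_getElem cs ' ' h, List.flatten_cons,
                  List.append_assoc]
            · have hd1 : cs.drop i = [cs[i]] := by
                rw [List.drop_eq_getElem_cons h,
                  List.drop_eq_nil_of_le (show cs.length ≤ i + 1 by omega)]
              rw [hd1, tok_single, List.drop_eq_nil_of_le (show cs.length ≤ i + 1 by omega)]
              simp only [List.getD_eq_getElem cs ' ' h, tokPiecesB, List.flatten_cons,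
                List.flatten_nil, List.append_nil]
      · rw [if_neg h, List.drop_eq_nil_of_le (by omega)]
        simp [tokPiecesB]

lemma expandLoopA_eq (cs : List Char) (i : Nat) (result : List Char) :
    expandLoopA cs i result = result ++ (tokPiecesB (cs.drop i)).flatten :=
  expandLoopA_eq_aux (cs.length - i) cs i result le_rfl

-- ===== VERDICT =====
theorem expand_set_py_spec : Claim_equal_expand_set_py := by
  intro s _
  unfold Spec_expand_set_py expand_set_py expand_set_py_alt
  rw [expandLoopA_eq, List.drop_zero, List.nil_append]
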